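-- pv_equiv track=rewrite | github.com/nupur710/qrcode-generator | versionselector.py | get_versions_info
-- ===== SOURCE A (Python) =====
-- def get_versions_info(num_chars, encoding):
--     versions_info= {
--             1:  [34,  20,  14,  8],
--             2:  [63,  38,  26,  16],
--             3:  [101, 61,  42,  26],
--             4:  [149, 90,  62,  38],
--             5:  [202, 122, 84,  52],
--             6:  [255, 154, 106, 65],
--             7:  [293, 178, 122, 75],
--             8:  [365, 221, 152, 93],
--             9:  [432, 262, 180, 111],
--             10: [513, 311, 213, 131],
--             11: [604, 366, 251, 155],
--             12: [691, 419, 287, 177],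
--             13: [796, 483, 331, 204],
--             14: [871, 528, 362, 223],
--             15: [991, 600, 412, 254],
--             16: [1082, 656, 450, 277],
--             17: [1212, 734, 504, 310],
--             18: [1346, 816, 560, 345],
--             19: [1500, 909, 624, 384],
--             20: [1600, 970, 666, 410],
--             21: [1708, 1035, 711, 438],
--             22: [1872, 1134, 779, 480],
--             23: [2059, 1248, 857, 528],
--             24: [2188, 1326, 911, 561],
--             25: [2395, 1451, 997, 614],
--             26: [2544, 1542, 1059, 652],
--             27: [2701, 1637, 1125, 692],
--             28: [2857, 1732, 1190, 732],
--             29: [3035, 1839, 1264, 778],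
--             30: [3289, 1994, 1370, 843],
--             31: [3486, 2113, 1452, 894],
--             32: [3693, 2238, 1538, 947],
--             33: [3909, 2369, 1628, 1002],
--             34: [4134, 2506, 1722, 1060],
--             35: [4343, 2632, 1809, 1113],
--             36: [4588, 2780, 1911, 1176],
--             37: [4775, 2894, 1989, 1224],
--             38: [5039, 3054, 2099, 1292],
--             39: [5313, 3220, 2213, 1362],
--             40: [5596, 3391, 2331, 1435]
--         }
--     for k,v in versions_info.items():
--         if v[encoding] >= num_chars:
--             return k
--     return None
-- ===== SOURCE B (Python) =====
-- # Column-major table: _COLS[e] is the capacity list of encoding column e.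
-- _COLS = [
--     [34, 63, 101, 149, 202, 255, 293, 365, 432, 513, 604, 691, 796, 871, 991,
--      1082, 1212, 1346, 1500, 1600, 1708, 1872, 2059, 2188, 2395, 2544, 2701,
--      2857, 3035, 3289, 3486, 3693, 3909, 4134, 4343, 4588, 4775, 5039, 5313, 5596],
--     [20, 38, 61, 90, 122, 154, 178, 221, 262, 311, 366, 419, 483, 528, 600,
--      656, 734, 816, 909, 970, 1035, 1134, 1248, 1326, 1451, 1542, 1637, 1732,
--      1839, 1994, 2113, 2238, 2369, 2506, 2632, 2780, 2894, 3054, 3220, 3391],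
--     [14, 26, 42, 62, 84, 106, 122, 152, 180, 213, 251, 287, 331, 362, 412,
--      450, 504, 560, 624, 666, 711, 779, 857, 911, 997, 1059, 1125, 1190, 1264,
--      1370, 1452, 1538, 1628, 1722, 1809, 1911, 1989, 2099, 2213, 2331],
--     [8, 16, 26, 38, 52, 65, 75, 93, 111, 131, 155, 177, 204, 223, 254, 277,
--      310, 345, 384, 410, 438, 480, 528, 561, 614, 652, 692, 732, 778, 843,
--      894, 947, 1002, 1060, 1113, 1176, 1224, 1292, 1362, 1435],
-- ]
--
-- def get_versions_info(num_chars, encoding):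
--     # The capacity column is increasing, so the smallest fitting version is
--     # 1 + (number of capacities strictly below num_chars).
--     caps = _COLS[encoding]
--     version = 1 + sum(1 for c in caps if c < num_chars)
--     return version if version <= len(caps) else None
-- ===== Notes on version B (the rewrite author's own statement) =====
-- stated objective: simpler
-- what changed: Stores the table column-major (one capacity list per encoding) and computes the version as 1 + count of capacities strictly below num_chars, instead of scanning the dict rows for the first fitting row.
import Mathlib
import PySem

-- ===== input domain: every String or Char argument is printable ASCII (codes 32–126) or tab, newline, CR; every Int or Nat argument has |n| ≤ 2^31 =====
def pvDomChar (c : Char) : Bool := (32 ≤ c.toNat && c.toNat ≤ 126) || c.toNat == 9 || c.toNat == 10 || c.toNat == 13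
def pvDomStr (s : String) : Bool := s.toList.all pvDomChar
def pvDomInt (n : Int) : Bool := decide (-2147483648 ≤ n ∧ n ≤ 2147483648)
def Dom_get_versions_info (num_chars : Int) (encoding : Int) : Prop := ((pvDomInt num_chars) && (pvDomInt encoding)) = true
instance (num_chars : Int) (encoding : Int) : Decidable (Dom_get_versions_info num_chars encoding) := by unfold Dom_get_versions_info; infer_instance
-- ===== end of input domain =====

-- B stores the table column-major (one capacity list per encoding) and computes the
-- version as 1 + count of capacities strictly below num_chars (objective: simpler).

-- ===== PORT A =====
-- the dict literal of A, as an insertion-ordered association list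
def pvTable : List (Int × List Int) := [
  (1, [34,20,14,8]),
  (2, [63,38,26,16]),
  (3, [101,61,42,26]),
  (4, [149,90,62,38]),
  (5, [202,122,84,52]),
  (6, [255,154,106,65]),
  (7, [293,178,122,75]),
  (8, [365,221,152,93]),
  (9, [432,262,180,111]),
  (10, [513,311,213,131]),
  (11, [604,366,251,155]),
  (12, [691,419,287,177]),
  (13, [796,483,331,204]),
  (14, [871,528,362,223]),
  (15, [991,600,412,254]),
  (16, [1082,656,450,277]),
  (17, [1212,734,504,310]),
  (18, [1346,816,560,345]),
  (19, [1500,909,624,384]),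
  (20, [1600,970,666,410]),
  (21, [1708,1035,711,438]),
  (22, [1872,1134,779,480]),
  (23, [2059,1248,857,528]),
  (24, [2188,1326,911,561]),
  (25, [2395,1451,997,614]),
  (26, [2544,1542,1059,652]),
  (27, [2701,1637,1125,692]),
  (28, [2857,1732,1190,732]),
  (29, [3035,1839,1264,778]),
  (30, [3289,1994,1370,843]),
  (31, [3486,2113,1452,894]),
  (32, [3693,2238,1538,947]),
  (33, [3909,2369,1628,1002]),
  (34, [4134,2506,1722,1060]),
  (35, [4343,2632,1809,1113]),
  (36, [4588,2780,1911,1176]),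
  (37, [4775,2894,1989,1224]),
  (38, [5039,3054,2099,1292]),
  (39, [5313,3220,2213,1362]),
  (40, [5596,3391,2331,1435])]

-- A's 'for k, v in versions_info.items(): if v[encoding] >= num_chars: return k'
-- (v[encoding] out of range raises IndexError in Python; pyGet? = none there, outside Pre_)
def pvLoopA (num_chars : Int) (encoding : Int) : List (Int × List Int) → Option Int
  | [] => none
  | (k, v) :: rest =>
    match PySem.List.pyGet? v encoding with
    | none => none
    | some c => if c ≥ num_chars then some k else pvLoopA num_chars encoding rest

def get_versions_info (num_chars : Int) (encoding : Int) : Option Int :=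
  pvLoopA num_chars encoding pvTable

-- ===== PORT B =====
-- Source B's column-major table _COLS: _COLS[e] is the capacity column of encoding e
def pvCols : List (List Int) := [
  [34,63,101,149,202,255,293,365,432,513,604,691,796,871,991,1082,1212,1346,1500,1600,
   1708,1872,2059,2188,2395,2544,2701,2857,3035,3289,3486,3693,3909,4134,4343,4588,4775,5039,5313,5596],
  [20,38,61,90,122,154,178,221,262,311,366,419,483,528,600,656,734,816,909,970,
   1035,1134,1248,1326,1451,1542,1637,1732,1839,1994,2113,2238,2369,2506,2632,2780,2894,3054,3220,3391],
  [14,26,42,62,84,106,122,152,180,213,251,287,331,362,412,450,504,560,624,666,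
   711,779,857,911,997,1059,1125,1190,1264,1370,1452,1538,1628,1722,1809,1911,1989,2099,2213,2331],
  [8,16,26,38,52,65,75,93,111,131,155,177,204,223,254,277,310,345,384,410,
   438,480,528,561,614,652,692,732,778,843,894,947,1002,1060,1113,1176,1224,1292,1362,1435]]

-- 'caps = _COLS[encoding]' ('sum(1 for c in caps if c < num_chars)' is countP)
def get_versions_info_alt (num_chars : Int) (encoding : Int) : Option Int :=
  match PySem.List.pyGet? pvCols encoding with
  | none => none  -- IndexError in Python, outside Pre_
  | some caps =>
    let version : Int := 1 + (caps.countP (fun c => decide (c < num_chars)) : Int)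
    if version ≤ (caps.length : Int) then some version else none

-- ===== PRECONDITION & SPEC =====
-- Pre_ excludes exactly the encodings outside [-4, 3], on which A's 'v[encoding]' raises IndexError.
def Pre_get_versions_info (num_chars : Int) (encoding : Int) : Prop :=
  -4 ≤ encoding ∧ encoding ≤ 3
instance (num_chars : Int) (encoding : Int) : Decidable (Pre_get_versions_info num_chars encoding) := by
  unfold Pre_get_versions_info; infer_instance

def pvWitness_get_versions_info : Int × Int := (100, 0)

def Spec_get_versions_info (num_chars : Int) (encoding : Int) (out : Option Int) : Prop := out = get_versions_info_alt num_chars encoding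
instance (num_chars : Int) (encoding : Int) (out : Option Int) : Decidable (Spec_get_versions_info num_chars encoding out) := by unfold Spec_get_versions_info; infer_instance

-- ===== CLAIM (what is proved, stated in full; the proofs are below) =====
def Claim_equal_get_versions_info : Prop := ∀ (num_chars : Int) (encoding : Int), Dom_get_versions_info num_chars encoding → Pre_get_versions_info num_chars encoding → Spec_get_versions_info num_chars encoding (get_versions_info num_chars encoding)

-- ===== LEMMAS AND PROOFS =====

-- A's loop is the first-match scan: with consecutive keys starting at k0 and
-- all rows indexable, it returns k0 + findIdx (capped to none at the end)
theorem pv_loopA_eq (x e : Int) :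
    ∀ (l : List (Int × List Int)) (k0 : Int),
    (∀ i (h : i < l.length), l[i].1 = k0 + (i : Int)) →
    (∀ kv ∈ l, (PySem.List.pyGet? kv.2 e).isSome = true) →
    pvLoopA x e l =
      (let caps := l.map (fun kv => (PySem.List.pyGet? kv.2 e).getD 0)
       let j := caps.findIdx (fun c => decide (x ≤ c))
       if j = caps.length then none else some (k0 + (j : Int))) := by
  intro l
  induction l with
  | nil => intro k0 _ _; simp [pvLoopA]
  | cons kv rest ih =>
    intro k0 hk hs
    obtain ⟨k, v⟩ := kv
    obtain ⟨c, hc⟩ := Option.isSome_iff_exists.mp (hs (k, v) (List.mem_cons_self))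
    have hk0 : k = k0 := by simpa using hk 0 (Nat.succ_pos _)
    simp only [pvLoopA, hc]
    by_cases hx : x ≤ c
    · simp [hc, hx, List.findIdx_cons, hk0, ge_iff_le]
    · have hrec := ih (k0 + 1)
        (by intro i hi
            have := hk (i + 1) (by simpa using Nat.succ_lt_succ hi)
            simpa [add_assoc, add_comm, add_left_comm] using this)
        (by intro kv' hm; exact hs kv' (List.mem_cons_of_mem _ hm))
      simp only [ge_iff_le, hx, if_false]
      rw [hrec]
      have hdc : (decide (x ≤ c)) = false := decide_eq_false hx
      simp only [List.map_cons, List.findIdx_cons, hc, Option.getD_some, hdc, cond_false,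
        List.length_cons, List.length_map, Nat.add_right_cancel_iff]
      split_ifs with h
      · rfl
      · congr 1
        push_cast
        ring

-- on a ≤-sorted list, the number of elements strictly below x is the index of
-- the first element ≥ x
theorem pv_count_eq_findIdx (x : Int) :
    ∀ (l : List Int), l.Pairwise (· ≤ ·) →
    l.countP (fun c => decide (c < x)) = l.findIdx (fun c => decide (x ≤ c)) := by
  intro l
  induction l with
  | nil => intro _; simp
  | cons a l ih =>
    intro hp
    rw [List.pairwise_cons] at hp
    by_cases hx : x ≤ a
    · have hrest : l.countP (fun c => decide (c < x)) = 0 := by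
        rw [List.countP_eq_zero]
        intro b hb
        simp only [decide_eq_true_eq, not_lt]
        exact le_trans hx (hp.1 b hb)
      simp [List.findIdx_cons, hx, not_lt.mpr hx, hrest]
    · have ha : a < x := not_le.mp hx
      simp [List.findIdx_cons, hx, ha, ih hp.2]

-- for one fixed valid encoding e with column L, A = B for every num_chars
theorem pv_main_at (e : Int) (L : List Int)
    (hcol : PySem.List.pyGet? pvCols e = some L)
    (hA : pvTable.map (fun kv => (PySem.List.pyGet? kv.2 e).getD 0) = L)
    (hs : ∀ kv ∈ pvTable, (PySem.List.pyGet? kv.2 e).isSome = true)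
    (hmono : L.Pairwise (· ≤ ·)) :
    ∀ x, get_versions_info x e = get_versions_info_alt x e := by
  intro x
  have hkeys : ∀ i (h : i < pvTable.length), pvTable[i].1 = 1 + (i : Int) := by decide
  have ha := pv_loopA_eq x e pvTable 1 hkeys hs
  show pvLoopA x e pvTable = _
  rw [ha]
  simp only [get_versions_info_alt, hcol, hA, pv_count_eq_findIdx x L hmono]
  have hle : L.findIdx (fun c => decide (x ≤ c)) ≤ L.length := List.findIdx_le_length
  by_cases hj : L.findIdx (fun c => decide (x ≤ c)) = L.length
  · simp [hj]
  · have : (1 + (L.findIdx (fun c => decide (x ≤ c)) : Int)) ≤ (L.length : Int) := by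
      omega
    simp [hj, this]

-- ===== VERDICT (by name: the statement is the Claim_ definition above) =====
theorem get_versions_info_spec : Claim_equal_get_versions_info := by
  intro num_chars encoding _ hpre
  obtain ⟨h1, h2⟩ := hpre
  show get_versions_info num_chars encoding = get_versions_info_alt num_chars encoding
  interval_cases encoding <;>
    exact pv_main_at _ _ rfl (by decide) (by decide) (by decide) num_chars
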